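-- pv_equiv track=rewrite | github.com/webclinic017/stock_lib | rakuten.py | tick_price
-- ===== SOURCE A (Python) =====
-- def tick_price(price):
--     tick_prices = [
--         [3000, 1],
--         [5000, 5],
--         [30000, 10],
--         [50000, 50],
--     ]
--     tick_price = None
--     for t in tick_prices:
--         if price < t[0]:
--             tick_price = t[1]
--             break
--
--     if tick_price is None:
--         tick_price = 100
--
--     return tick_price
-- ===== SOURCE B (Python) =====
-- def tick_price(price):
--     thresholds = [3000, 5000, 30000, 50000]
--     ticks = [1, 5, 10, 50, 100]
--     lo, hi = 0, len(thresholds)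
--     while lo < hi:
--         mid = (lo + hi) // 2
--         if price < thresholds[mid]:
--             hi = mid
--         else:
--             lo = mid + 1
--     return ticks[lo]
-- ===== Notes on version B (the rewrite author's own statement) =====
-- stated objective: alternative
-- what changed: Replaces the sequential scan-with-break over (threshold, tick) pairs plus a None-sentinel default branch by a binary search (bisect_right semantics) over a sorted threshold list indexing a parallel tick list whose last entry is the default bucket.
import Mathlib
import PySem

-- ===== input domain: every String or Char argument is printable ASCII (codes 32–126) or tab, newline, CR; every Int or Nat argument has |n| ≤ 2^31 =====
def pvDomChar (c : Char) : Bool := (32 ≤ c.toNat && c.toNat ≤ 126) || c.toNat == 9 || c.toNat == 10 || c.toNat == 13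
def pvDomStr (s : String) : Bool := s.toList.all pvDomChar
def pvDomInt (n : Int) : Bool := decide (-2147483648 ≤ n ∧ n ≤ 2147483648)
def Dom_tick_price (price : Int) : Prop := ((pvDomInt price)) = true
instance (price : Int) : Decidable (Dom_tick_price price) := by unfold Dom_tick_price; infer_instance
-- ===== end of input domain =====

-- B replaces A's linear scan-with-break (None sentinel + default branch) by a hand-written
-- binary search over a sorted threshold list with a parallel tick list; same values everywhere.

-- ===== PORT A =====
-- the for-loop with break: first pair whose threshold exceeds price, as Option (None sentinel)
def tickScanA (price : Int) : List (Int × Int) → Option Int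
  | [] => none
  | t :: rest => if price < t.1 then some t.2 else tickScanA price rest

def tick_price (price : Int) : Int :=
  let tick_prices : List (Int × Int) := [(3000, 1), (5000, 5), (30000, 10), (50000, 50)]
  match tickScanA price tick_prices with
  | some v => v
  | none => 100

-- ===== PORT B =====
def bThresholds : List Int := [3000, 5000, 30000, 50000]
def bTicks : List Int := [1, 5, 10, 50, 100]

-- the while-loop of B: binary search (bisect_right semantics) on bThresholds
def bisectLoopB (price : Int) (lo hi : Nat) : Nat :=
  if _h : lo < hi then
    let mid := (lo + hi) / 2
    if price < bThresholds.getD mid 0 then bisectLoopB price lo mid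
    else bisectLoopB price (mid + 1) hi
  else lo
termination_by hi - lo
decreasing_by all_goals omega

def tick_price_alt (price : Int) : Int :=
  bTicks.getD (bisectLoopB price 0 bThresholds.length) 0

-- ===== PRECONDITION & SPEC =====
def Spec_tick_price (price : Int) (out : Int) : Prop := out = tick_price_alt price
instance (price : Int) (out : Int) : Decidable (Spec_tick_price price out) := by unfold Spec_tick_price; infer_instance

-- ===== CLAIM (what is proved, stated in full; the proofs are below) =====
def Claim_equal_tick_price : Prop := ∀ (price : Int), Dom_tick_price price → Spec_tick_price price (tick_price price)

-- ===== LEMMAS AND PROOFS =====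

-- ===== VERDICT (by name: the statement is the Claim_ definition above) =====
theorem tick_price_spec : Claim_equal_tick_price := by
  intro price _
  unfold Spec_tick_price tick_price tick_price_alt
  by_cases h1 : price < 3000 <;> by_cases h2 : price < 5000 <;>
    by_cases h3 : price < 30000 <;> by_cases h4 : price < 50000 <;>
      simp [tickScanA, bisectLoopB, bThresholds, bTicks, h1, h2, h3, h4] <;> omega
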